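-- pv_equiv track=rewrite | github.com/daviddelafp/CursoIA | comprobar_test_sat.py | codificar_respuesta
-- ===== SOURCE A (Python) =====
-- def codificar_respuesta(respuesta):
--     ascii_vals = [ord(c) for c in respuesta]
--     chunks = [ascii_vals[i:i+4] for i in range(0, len(ascii_vals), 4)]
--     firma = []
--     for bloque in chunks:
--         producto = 1
--         for num in bloque:
--             producto *= num
--         firma.append(producto)
--     return firma
-- ===== SOURCE B (Python) =====
-- def codificar_respuesta(respuesta):
--     firma = []
--     producto = 1
--     contador = 0
--     for c in respuesta:
--         producto *= ord(c)
--         contador += 1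
--         if contador == 4:
--             firma.append(producto)
--             producto = 1
--             contador = 0
--     if contador:
--         firma.append(producto)
--     return firma
-- ===== Notes on version B (the rewrite author's own statement) =====
-- stated objective: simpler
-- what changed: Single pass over the characters with a running product and a counter flushed every 4 chars, instead of materializing an ASCII list, a list of 4-element slices, and a nested product loop.
import Mathlib
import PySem

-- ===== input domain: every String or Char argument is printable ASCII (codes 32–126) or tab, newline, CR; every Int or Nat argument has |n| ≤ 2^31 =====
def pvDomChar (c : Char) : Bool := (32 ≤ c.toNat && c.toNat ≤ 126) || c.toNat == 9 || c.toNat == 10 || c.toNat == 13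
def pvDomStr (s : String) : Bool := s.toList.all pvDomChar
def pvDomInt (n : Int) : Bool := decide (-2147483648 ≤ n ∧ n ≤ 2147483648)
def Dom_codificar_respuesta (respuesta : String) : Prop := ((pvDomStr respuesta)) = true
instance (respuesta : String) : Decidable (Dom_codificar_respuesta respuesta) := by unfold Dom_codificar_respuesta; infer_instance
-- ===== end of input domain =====

-- B replaces A's intermediate lists (ascii list, slice list, nested product loop)
-- by a single pass with a running product and a counter flushed every 4 characters (objective: simpler).

-- ===== PORT A =====
def codificar_respuesta (respuesta : String) : List Int :=
  let ascii_vals : List Int := respuesta.toList.map (fun c => (c.toNat : Int))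
  let chunks : List (List Int) :=
    (PySem.List.pyRange 0 (ascii_vals.length : Int) 4).map
      (fun i => PySem.List.slice ascii_vals (some i) (some (i + 4)))
  chunks.foldl (fun firma bloque => firma ++ [bloque.foldl (fun producto num => producto * num) 1]) []

-- ===== PORT B =====
-- the for-loop as a structural recursion over the characters; state = (firma, producto, contador)
def altLoop : List Char → List Int → Int → Int → List Int
  | [], firma, producto, contador =>
      if contador ≠ 0 then firma ++ [producto] else firma
  | c :: rest, firma, producto, contador =>
      let producto := producto * (c.toNat : Int)
      let contador := contador + 1
      if contador = 4 then altLoop rest (firma ++ [producto]) 1 0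
      else altLoop rest firma producto contador

def codificar_respuesta_alt (respuesta : String) : List Int :=
  altLoop respuesta.toList [] 1 0

-- ===== PRECONDITION & SPEC =====
def Spec_codificar_respuesta (respuesta : String) (out : List Int) : Prop := out = codificar_respuesta_alt respuesta
instance (respuesta : String) (out : List Int) : Decidable (Spec_codificar_respuesta respuesta out) := by unfold Spec_codificar_respuesta; infer_instance

-- ===== CLAIM (what is proved, stated in full; the proofs are below) =====
def Claim_equal_codificar_respuesta : Prop := ∀ (respuesta : String), Dom_codificar_respuesta respuesta → Spec_codificar_respuesta respuesta (codificar_respuesta respuesta)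

-- ===== LEMMAS AND PROOFS =====

-- canonical chunked product: the product of each 4-element block, last block possibly shorter
def chunkProd : List Int → List Int
  | [] => []
  | a :: b :: c :: d :: t => (((1 * a) * b) * c) * d :: chunkProd t
  | l => [l.foldl (fun p n => p * n) 1]

-- A's outer loop (foldl with singleton append) is a map over the chunks
theorem foldl_append_map (g : List Int → Int) (xs : List (List Int)) :
    ∀ (init : List Int),
      xs.foldl (fun f b => f ++ [g b]) init = init ++ xs.map g := by
  induction xs with
  | nil => intro init; simp
  | cons x t ih => intro init; simp [List.foldl, ih]

-- A's range-of-slices chunking, already reduced to drop/take form, equals chunkProd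
theorem rangeProd (l : List Int) :
    (List.range ((l.length + 3) / 4)).map
        (fun k => ((l.drop (4 * k)).take 4).foldl (fun p n => p * n) 1) = chunkProd l := by
  match l with
  | [] => simp [chunkProd]
  | [a] => simp [chunkProd, List.foldl]
  | [a, b] => simp [chunkProd, List.foldl]
  | [a, b, c] => simp [chunkProd, List.foldl]
  | a :: b :: c :: d :: t =>
    have ih := rangeProd t
    have hm : ((a :: b :: c :: d :: t).length + 3) / 4 = (t.length + 3) / 4 + 1 := by
      simp; omega
    rw [hm, List.range_succ_eq_map, List.map_cons, List.map_map]
    rw [chunkProd]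
    refine List.cons_eq_cons.mpr ⟨by norm_num [List.foldl], ?_⟩
    rw [← ih]
    apply List.map_congr_left
    intro k _
    have h44 : 4 * (k + 1) = 4 * k + 1 + 1 + 1 + 1 := by ring
    simp [Function.comp, h44, List.drop_succ_cons]

-- B's loop, started with a clean counter, appends chunkProd of the ASCII codes to the accumulator
theorem altLoop_run (l : List Char) :
    ∀ acc : List Int,
      altLoop l acc 1 0 = acc ++ chunkProd (l.map (fun c => (c.toNat : Int))) := by
  match l with
  | [] => intro acc; simp [altLoop, chunkProd]
  | [a] => intro acc; simp [altLoop, chunkProd]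
  | [a, b] => intro acc; simp [altLoop, chunkProd]
  | [a, b, c] => intro acc; simp [altLoop, chunkProd]
  | a :: b :: c :: d :: t =>
    intro acc
    have ih := altLoop_run t (acc ++ [1 * (a.toNat : Int) * (b.toNat : Int) * (c.toNat : Int) * (d.toNat : Int)])
    simp only [altLoop] at ih ⊢
    norm_num at ih ⊢
    rw [ih]
    simp [chunkProd, mul_assoc]

-- ===== VERDICT (by name: the statement is the Claim_ definition above) =====
theorem codificar_respuesta_spec : Claim_equal_codificar_respuesta := by
  intro s _
  unfold Spec_codificar_respuesta
  simp only [codificar_respuesta, codificar_respuesta_alt]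
  rw [altLoop_run s.toList []]
  rw [List.nil_append]
  set l : List Int := s.toList.map (fun c => (c.toNat : Int)) with hl
  rw [foldl_append_map (fun b => b.foldl (fun p n => p * n) 1)]
  rw [List.nil_append]
  rw [PySem.List.pyRange_of_pos 0 (l.length : Int) (by norm_num), List.map_map]
  rw [← rangeProd l]
  have hM : (if (0 : Int) < (l.length : Int)
      then (((l.length : Int) - 0 + 4 - 1) / 4).toNat else 0) = (l.length + 3) / 4 := by
    split_ifs with h
    · omega
    · omega
  rw [hM, List.map_map]
  apply List.map_congr_left
  intro k hk
  simp only [Function.comp]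
  have h0 : (0 : Int) + 4 * (k : Int) = ((4 * k : Nat) : Int) := by push_cast; ring
  rw [h0, PySem.List.slice_toNat l (a := ((4 * k : Nat) : Int)) (b := ((4 * k : Nat) : Int) + 4)
        (by positivity) (by positivity)]
  have e2 : ((((4 * k : Nat) : Int)) + 4).toNat - (((4 * k : Nat) : Int)).toNat = 4 := by omega
  have e1 : (((4 * k : Nat) : Int)).toNat = 4 * k := by omega
  rw [e2, e1]
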